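-- pv_equiv track=rewrite | github.com/lnyxzdevk/boostcamp8_algorithm | 디펜스게임/defensegame_ikno.py | solution
-- ===== SOURCE A (Python) =====
-- import heapq
--
-- def solution(n, k, enemy):
--     result=0
--     heap=[]
--     for ene in enemy:
--         if n>= ene:
--             heapq.heappush(heap,-ene)
--             n=n-ene
--         else:
--             if k>0:
--                 k-=1
--                 if heap==[]:
--                     result+=1
--                     continue
--                 maxene=heapq.heappop(heap)
--                 if (-maxene)>ene:
--                     n=n-maxene
--                     n=n-ene
--                     heapq.heappush(heap,-ene)
--                 else:
--                     heapq.heappush(heap,maxene)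
--                     pass
--             else:
--                 break
--         result+=1
--
--     return result
-- ===== SOURCE B (Python) =====
-- def solution(n, k, enemy):
--     kept = []
--     i = 0
--     while i < len(enemy):
--         kept.append(enemy[i])
--         n -= enemy[i]
--         if n < 0:
--             big = max(kept)
--             kept.remove(big)
--             n += big
--             k -= 1
--             if k < 0:
--                 return i
--         i += 1
--     return len(enemy)
-- ===== Notes on version B (the rewrite author's own statement) =====
-- stated objective: simpler
-- what changed: Removes heapq and A's three-branch pop-compare-and-swap greedy entirely: B keeps the paid waves in a plain unsorted list, appends every wave and subtracts it from the budget, and when the budget goes negative refunds max(kept) found by a linear scan (list max + remove) and spends a skip, returning the current index when skips run out; no priority structure, no heap invariant, no empty-heap or swap branches.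
import Mathlib
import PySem

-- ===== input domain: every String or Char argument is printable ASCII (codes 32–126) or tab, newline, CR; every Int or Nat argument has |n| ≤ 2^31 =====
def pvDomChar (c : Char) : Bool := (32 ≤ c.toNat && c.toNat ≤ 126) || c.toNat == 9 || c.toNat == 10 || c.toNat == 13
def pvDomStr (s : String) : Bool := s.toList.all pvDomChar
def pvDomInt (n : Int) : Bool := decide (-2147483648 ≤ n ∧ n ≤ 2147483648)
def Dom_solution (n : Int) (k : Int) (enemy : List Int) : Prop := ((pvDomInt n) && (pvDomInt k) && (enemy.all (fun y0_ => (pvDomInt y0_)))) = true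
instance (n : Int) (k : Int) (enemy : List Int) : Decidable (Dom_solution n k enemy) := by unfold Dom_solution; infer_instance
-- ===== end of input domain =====

-- B drops the heap and A's three-branch swap logic entirely: it keeps the paid waves in a
-- plain unsorted list, pushes every wave, and on deficit refunds max(kept) found by a
-- linear scan, spending a skip (objective: simpler).

-- ===== PORT A =====
-- Python's heapq on NEGATED enemy values is a max-priority queue; A observes it only through
-- heappop (the maximum stored wave) and emptiness, so the library calls are ported as a
-- canonical max-priority queue: a descending-sorted list whose head is the maximum
-- (exact: heappush(heap,-x) = hpush x, -heappop = head, heap==[] = list emptiness).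
def hpush (x : Int) : List Int → List Int
  | [] => [x]
  | y :: ys => if x ≥ y then x :: y :: ys else y :: hpush x ys

-- the for-loop of A: result is the accumulator (result += 1 each completed round; break returns it)
def solLoopA (n : Int) (k : Int) (heap : List Int) (result : Int) : List Int → Int
  | [] => result
  | ene :: rest =>
    if n ≥ ene then
      -- heapq.heappush(heap,-ene); n = n - ene; result += 1
      solLoopA (n - ene) k (hpush ene heap) (result + 1) rest
    else if k > 0 then
      match heap with
      | [] => solLoopA n (k - 1) [] (result + 1) rest          -- result += 1; continue
      | m :: hs =>
        -- maxene = heapq.heappop(heap)  (maxene = -m)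
        if m > ene then
          -- n = n - maxene; n = n - ene; heappush(heap,-ene); result += 1
          solLoopA (n + m - ene) (k - 1) (hpush ene hs) (result + 1) rest
        else
          -- heappush(heap, maxene); result += 1
          solLoopA n (k - 1) (m :: hs) (result + 1) rest
    else result                                                 -- break

def solution (n : Int) (k : Int) (enemy : List Int) : Int :=
  solLoopA n k [] 0 enemy

-- ===== PORT B =====
-- the while-loop of B over index i; kept is the plain (unsorted, append-order) list of paid
-- waves; max(kept) → PySem.List.max?, kept.remove(big) → PySem.List.remove?
def solLoopB (n : Int) (k : Int) (kept : List Int) (i : Int) (len : Int) : List Int → Int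
  | [] => len
  | e :: rest =>
    -- kept.append(enemy[i]); n -= enemy[i]
    if n - e < 0 then
      match PySem.List.max? (kept ++ [e]) (fun x => x) with
      | none => len                                   -- unreachable: kept ++ [e] is nonempty
      | some big =>
        match PySem.List.remove? (kept ++ [e]) big with
        | none => len                                 -- unreachable: big ∈ kept ++ [e]
        | some kept' =>
          -- n += big; k -= 1; if k < 0: return i
          if k - 1 < 0 then i
          else solLoopB (n - e + big) (k - 1) kept' (i + 1) len rest
    else solLoopB (n - e) k (kept ++ [e]) (i + 1) len rest

def solution_alt (n : Int) (k : Int) (enemy : List Int) : Int :=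
  solLoopB n k [] 0 (Int.ofNat enemy.length) enemy

-- ===== PRECONDITION & SPEC =====
def Spec_solution (n : Int) (k : Int) (enemy : List Int) (out : Int) : Prop := out = solution_alt n k enemy
instance (n : Int) (k : Int) (enemy : List Int) (out : Int) : Decidable (Spec_solution n k enemy out) := by unfold Spec_solution; infer_instance

-- ===== CLAIM (what is proved, stated in full; the proofs are below) =====
def Claim_equal_solution : Prop := ∀ (n : Int) (k : Int) (enemy : List Int), Dom_solution n k enemy → Spec_solution n k enemy (solution n k enemy)

-- ===== LEMMAS AND PROOFS =====

-- A's heap and B's kept list always hold the same multiset of paid waves; A's heap is in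
-- addition sorted descending, so A's heappop returns exactly the value B finds by max(kept).

theorem hpush_perm (x : Int) (l : List Int) : (hpush x l).Perm (x :: l) := by
  induction l with
  | nil => simp [hpush]
  | cons y ys ih =>
    by_cases h : x ≥ y
    · simp [hpush, h]
    · simp only [hpush, if_neg h]
      exact (List.Perm.cons y ih).trans (List.Perm.swap x y ys)

theorem hpush_sorted (x : Int) (l : List Int) (h : List.Pairwise (· ≥ ·) l) :
    List.Pairwise (· ≥ ·) (hpush x l) := by
  induction l with
  | nil => simp [hpush]
  | cons y ys ih =>
    rw [List.pairwise_cons] at h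
    obtain ⟨hy, hys⟩ := h
    by_cases hx : x ≥ y
    · simp only [hpush, if_pos hx]
      rw [List.pairwise_cons]
      refine ⟨?_, by rw [List.pairwise_cons]; exact ⟨hy, hys⟩⟩
      intro b hb
      rcases List.mem_cons.mp hb with rfl | hb
      · exact hx
      · exact le_trans (hy b hb) hx
    · simp only [hpush, if_neg hx]
      rw [List.pairwise_cons]
      refine ⟨?_, ih hys⟩
      intro b hb
      rcases List.mem_cons.mp ((hpush_perm x ys).mem_iff.mp hb) with rfl | hb
      · omega
      · exact hy b hb

theorem sorted_head_max (m : Int) (hs : List Int) (h : List.Pairwise (· ≥ ·) (m :: hs)) :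
    ∀ y ∈ m :: hs, y ≤ m := by
  intro y hy
  rcases List.mem_cons.mp hy with rfl | hy
  · exact le_refl _
  · exact (List.pairwise_cons.mp h).1 y hy

theorem max?_eq_of_ub (l : List Int) (v : Int) (hv : v ∈ l) (hub : ∀ y ∈ l, y ≤ v) :
    PySem.List.max? l (fun x => x) = some v := by
  cases hm : PySem.List.max? l (fun x => x) with
  | none =>
    rw [PySem.List.max?_eq_none_iff] at hm
    subst hm; simp at hv
  | some m =>
    have hmem := PySem.List.max?_mem hm
    have hmax := PySem.List.max?_isMax hm
    have : m = v := le_antisymm (hub m hmem) (hmax v hv)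
    rw [this]

-- The two loops coincide from any pair of states holding the same multiset of paid waves
-- (A's additionally sorted descending); at the end of the list A's result counter equals
-- B's index, which then equals len.
theorem solLoop_eq (enemy : List Int) : ∀ (n k : Int) (heap kept : List Int) (i len : Int),
    heap.Perm kept → List.Pairwise (· ≥ ·) heap → i + (enemy.length : Int) = len →
    solLoopA n k heap i enemy = solLoopB n k kept i len enemy := by
  induction enemy with
  | nil =>
    intro n k heap kept i len _ _ hlen
    simp at hlen
    simp [solLoopA, solLoopB, hlen]
  | cons e rest ih =>
    intro n k heap kept i len hperm hsort hlen
    have hlen' : (i + 1) + (rest.length : Int) = len := by simp at hlen; omega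
    have hperm2 : (kept ++ [e]).Perm (e :: heap) :=
      (List.perm_append_singleton e kept).trans (List.Perm.cons e hperm.symm)
    by_cases hne : n ≥ e
    · -- affordable round: A pays and pushes; B appends and stays nonnegative
      have hnn : ¬ (n - e < 0) := by omega
      simp only [solLoopA, solLoopB, if_pos hne, if_neg hnn]
      exact ih (n - e) k (hpush e heap) (kept ++ [e]) (i + 1) len
        ((hpush_perm e heap).trans hperm2.symm) (hpush_sorted e heap hsort) hlen'
    · have hdef : n - e < 0 := by omega
      cases heap with
      | nil =>
        -- empty heap: B's max of kept ++ [e] is e itself and the refund undoes the append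
        have hkept : kept = [] := hperm.symm.eq_nil
        subst hkept
        have hmax : PySem.List.max? [e] (fun x => x) = some e :=
          max?_eq_of_ub _ e (by simp) (by simp)
        simp only [solLoopA, solLoopB, if_neg hne, if_pos hdef, List.nil_append, hmax,
          PySem.List.remove?_cons_self]
        by_cases hk : k > 0
        · rw [if_pos hk, if_neg (by omega : ¬ (k - 1 < 0)), show n - e + e = n by ring]
          exact ih n (k - 1) [] [] (i + 1) len (List.Perm.refl _) List.Pairwise.nil hlen'
        · rw [if_neg hk, if_pos (by omega : k - 1 < 0)]
      | cons m0 hs =>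
        have hub : ∀ y ∈ kept ++ [e], y ≤ max m0 e := by
          intro y hy
          rcases List.mem_cons.mp (hperm2.mem_iff.mp hy) with rfl | hy
          · exact le_max_right _ _
          · exact le_trans (sorted_head_max m0 hs hsort y hy) (le_max_left _ _)
        have hsort' := (List.pairwise_cons.mp hsort).2
        simp only [solLoopA, solLoopB, if_neg hne, if_pos hdef]
        by_cases hme : m0 > e
        · -- A swaps out the largest paid wave m0; B's linear max finds the same value
          rw [show max m0 e = m0 by omega] at hub
          have hm0mem : m0 ∈ kept ++ [e] := hperm2.mem_iff.mpr (by simp)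
          have hmax : PySem.List.max? (kept ++ [e]) (fun x => x) = some m0 :=
            max?_eq_of_ub _ m0 hm0mem hub
          have hrem : PySem.List.remove? (kept ++ [e]) m0 = some ((kept ++ [e]).erase m0) :=
            PySem.List.remove?_eq_some_erase (kept ++ [e]) m0 hm0mem
          have herase : ((kept ++ [e]).erase m0).Perm (e :: hs) := by
            have h1 := hperm2.erase m0
            rwa [List.erase_cons_tail (by simp; omega), List.erase_cons_head] at h1
          simp only [hmax, hrem, if_pos hme]
          by_cases hk : k > 0
          · rw [if_pos hk, if_neg (by omega : ¬ (k - 1 < 0)),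
                show n - e + m0 = n + m0 - e by ring]
            exact ih (n + m0 - e) (k - 1) (hpush e hs) ((kept ++ [e]).erase m0) (i + 1) len
              ((hpush_perm e hs).trans herase.symm) (hpush_sorted e hs hsort') hlen'
          · rw [if_neg hk, if_pos (by omega : k - 1 < 0)]
        · -- the new wave e is itself the maximum: B refunds it, A pushes m0 back unchanged
          rw [show max m0 e = e by omega] at hub
          have hemem : e ∈ kept ++ [e] := by simp
          have hmax : PySem.List.max? (kept ++ [e]) (fun x => x) = some e :=
            max?_eq_of_ub _ e hemem hub
          have hrem : PySem.List.remove? (kept ++ [e]) e = some ((kept ++ [e]).erase e) :=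
            PySem.List.remove?_eq_some_erase (kept ++ [e]) e hemem
          have herase : ((kept ++ [e]).erase e).Perm (m0 :: hs) := by
            have h1 := hperm2.erase e
            rwa [List.erase_cons_head] at h1
          simp only [hmax, hrem, if_neg hme]
          by_cases hk : k > 0
          · rw [if_pos hk, if_neg (by omega : ¬ (k - 1 < 0)), show n - e + e = n by ring]
            exact ih n (k - 1) (m0 :: hs) ((kept ++ [e]).erase e) (i + 1) len
              herase.symm hsort hlen'
          · rw [if_neg hk, if_pos (by omega : k - 1 < 0)]

-- ===== VERDICT (by name: the statement is the Claim_ definition above) =====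
theorem solution_spec : Claim_equal_solution := by
  intro n k enemy _
  unfold Spec_solution solution solution_alt
  exact solLoop_eq enemy n k [] [] 0 (Int.ofNat enemy.length)
    (List.Perm.refl _) List.Pairwise.nil (by simp)
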